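-- pv_equiv track=rewrite | github.com/hep-gc/cloudscheduler | lib/view_utils.py | table_fields
-- ===== SOURCE A (Python) =====
-- def table_fields(Fields, Table, Columns, selection):
--     """
--     This function returns input fields for the specified table.
--
--     Arguments:
--
--     Table    - Is a table string as returned by validate_fields.
--
--     Columns  - Are the primary and secondary column lists for tables
--                as returned by validate_fields.
--
--     Fields   - Is a dictionary of input fields as returned by
--                validate_fields.
--     """
--
--     output_fields = {}
--
--     if selection == 'insert':
--         for field in Columns[Table][0]:
--             if field in Fields:
--                 output_fields[field] = Fields[field]
--
--     if selection == 'insert' or selection == 'update':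
--         for field in Columns[Table][1]:
--             if field in Fields:
--                 output_fields[field] = Fields[field]
--
--     return output_fields
-- ===== SOURCE B (Python) =====
-- def table_fields(Fields, Table, Columns, selection):
--     # Invert the traversal: walk Fields once, keep items whose name occurs in the
--     # selected column lists, then stable-sort by each name's first-occurrence rank
--     # to restore the column-list order.
--     if selection == 'insert':
--         wanted = Columns[Table][0] + Columns[Table][1]
--     elif selection == 'update':
--         wanted = Columns[Table][1]
--     else:
--         wanted = []
--
--     rank = {}
--     for i, f in enumerate(wanted):
--         if f not in rank:
--             rank[f] = i
--
--     kept = [kv for kv in Fields.items() if kv[0] in rank]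
--     kept.sort(key=lambda kv: rank[kv[0]])
--     return dict(kept)
-- ===== Notes on version B (the rewrite author's own statement) =====
-- stated objective: alternative
-- what changed: B inverts the traversal: instead of two loops over the column lists inserting into a dict, it builds a first-occurrence rank index over the selected column lists, keeps the Fields items whose name is in that index in one pass over Fields, and stable-sorts the kept items by rank to reproduce the column-list order.
import Mathlib
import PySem

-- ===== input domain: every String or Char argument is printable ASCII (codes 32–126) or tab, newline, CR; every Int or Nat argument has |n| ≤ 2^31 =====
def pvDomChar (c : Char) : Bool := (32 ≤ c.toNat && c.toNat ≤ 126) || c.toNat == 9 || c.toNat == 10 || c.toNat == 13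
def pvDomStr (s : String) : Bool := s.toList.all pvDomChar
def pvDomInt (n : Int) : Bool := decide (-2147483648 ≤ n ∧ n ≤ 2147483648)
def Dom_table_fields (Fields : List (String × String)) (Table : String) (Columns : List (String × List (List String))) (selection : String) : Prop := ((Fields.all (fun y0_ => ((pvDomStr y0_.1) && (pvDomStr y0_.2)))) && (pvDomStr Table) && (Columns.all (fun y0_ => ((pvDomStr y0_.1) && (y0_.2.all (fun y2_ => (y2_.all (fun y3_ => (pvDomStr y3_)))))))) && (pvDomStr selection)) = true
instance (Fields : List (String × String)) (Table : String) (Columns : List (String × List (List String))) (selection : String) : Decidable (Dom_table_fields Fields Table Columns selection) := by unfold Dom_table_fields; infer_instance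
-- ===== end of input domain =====

-- B replaces A's two column-list loops inserting into a dict by one pass over Fields against a
-- precomputed first-occurrence rank index plus a stable sort by rank (objective: alternative).

-- ===== PORT A =====
-- Literal port of A. Python's Columns[Table][0]/[1] raise KeyError/IndexError when missing/short;
-- the port uses getD/pyGetD defaults there and Pre_table_fields excludes exactly those inputs.
def table_fields (Fields : List (String × String)) (Table : String) (Columns : List (String × List (List String))) (selection : String) : List (String × String) :=
  let F : PySem.Dict String String := PySem.Dict.mk Fields
  let out0 : PySem.Dict String String := PySem.Dict.empty
  let out1 : PySem.Dict String String :=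
    if selection == "insert" then
      (PySem.List.pyGetD ((PySem.Dict.mk Columns).getD Table []) 0 []).foldl
        (fun d f => if F.contains f then d.insert f (F.getD f "") else d) out0
    else out0
  let out2 : PySem.Dict String String :=
    if selection == "insert" || selection == "update" then
      (PySem.List.pyGetD ((PySem.Dict.mk Columns).getD Table []) 1 []).foldl
        (fun d f => if F.contains f then d.insert f (F.getD f "") else d) out1
    else out1
  out2.items

-- ===== PORT B =====
-- Literal port of Source B: build 'wanted', a first-occurrence rank dict over it, filter Fields once,
-- stable-sort the kept items by rank, and build the result dict from them.
def table_fields_alt (Fields : List (String × String)) (Table : String) (Columns : List (String × List (List String))) (selection : String) : List (String × String) :=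
  let row : List (List String) := (PySem.Dict.mk Columns).getD Table []
  let wanted : List String :=
    if selection == "insert" then PySem.List.pyGetD row 0 [] ++ PySem.List.pyGetD row 1 []
    else if selection == "update" then PySem.List.pyGetD row 1 []
    else []
  let rank : PySem.Dict String Int :=
    (PySem.List.enumerate wanted 0).foldl
      (fun r p => if r.contains p.2 then r else r.insert p.2 p.1) PySem.Dict.empty
  let kept : List (String × String) := Fields.filter (fun kv => rank.contains kv.1)
  let srt : List (String × String) := PySem.List.sorted kept (fun kv => rank.getD kv.1 0)
  (srt.foldl (fun d kv => d.insert kv.1 kv.2) PySem.Dict.empty).items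

-- ===== PRECONDITION & SPEC =====
-- Pre_ excludes exactly the inputs where Python A raises (KeyError/IndexError: selection 'insert' or
-- 'update' with Columns[Table] missing or shorter than 2) and, in the Lean model only, Fields
-- association lists with duplicate keys — such lists cannot arise from the Python dict Fields.
def Pre_table_fields (Fields : List (String × String)) (Table : String) (Columns : List (String × List (List String))) (selection : String) : Prop :=
  (Fields.map Prod.fst).Nodup ∧
  ((selection = "insert" ∨ selection = "update") → 2 ≤ ((PySem.Dict.mk Columns).getD Table []).length)
instance (Fields : List (String × String)) (Table : String) (Columns : List (String × List (List String))) (selection : String) : Decidable (Pre_table_fields Fields Table Columns selection) := by unfold Pre_table_fields; infer_instance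

def pvWitness_table_fields : (List (String × String)) × String × (List (String × List (List String))) × String :=
  ([("host", "h1"), ("ram", "4")], "vm", [("vm", [["host"], ["ram", "cores"]])], "insert")

def Spec_table_fields (Fields : List (String × String)) (Table : String) (Columns : List (String × List (List String))) (selection : String) (out : List (String × String)) : Prop := out = table_fields_alt Fields Table Columns selection
instance (Fields : List (String × String)) (Table : String) (Columns : List (String × List (List String))) (selection : String) (out : List (String × String)) : Decidable (Spec_table_fields Fields Table Columns selection out) := by unfold Spec_table_fields; infer_instance

-- ===== CLAIM (what is proved, stated in full; the proofs are below) =====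
def Claim_equal_table_fields : Prop := ∀ (Fields : List (String × String)) (Table : String) (Columns : List (String × List (List String))) (selection : String), Dom_table_fields Fields Table Columns selection → Pre_table_fields Fields Table Columns selection → Spec_table_fields Fields Table Columns selection (table_fields Fields Table Columns selection)

-- ===== LEMMAS AND PROOFS =====

-- A's loop body and the common normal form both ports reduce to: the wanted names in
-- first-occurrence order, restricted to Fields, paired with their Fields values.
def tfStep (F : PySem.Dict String String) (d : PySem.Dict String String) (f : String) : PySem.Dict String String :=
  if F.contains f then d.insert f (F.getD f "") else d

def tfTarget (F : PySem.Dict String String) (W : List String) : List (String × String) :=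
  ((PySem.List.dedup W).filter (fun f => F.contains f)).map (fun f => (f, F.getD f ""))

theorem tf_dedup_append_singleton (W : List String) (f : String) :
    PySem.List.dedup (W ++ [f]) =
      if f ∈ W then PySem.List.dedup W else PySem.List.dedup W ++ [f] := by
  simp only [PySem.List.dedup_eq_ofList, PySem.Set.ofList_eq_foldl, List.foldl_append,
    List.foldl_cons, List.foldl_nil]
  rw [← PySem.Set.ofList_eq_foldl]
  by_cases h : f ∈ W
  · simp [PySem.Set.add, PySem.Set.contains, PySem.Set.mem_ofList, h]
  · simp [PySem.Set.add, PySem.Set.contains, PySem.Set.mem_ofList, h]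

theorem tf_target_keys (F : PySem.Dict String String) (W : List String) :
    (tfTarget F W).map Prod.fst = (PySem.List.dedup W).filter (fun f => F.contains f) := by
  simp [tfTarget, Function.comp_def]

theorem tf_target_contains (F : PySem.Dict String String) (W : List String) (f : String) :
    (PySem.Dict.mk (tfTarget F W)).contains f =
      ((PySem.List.dedup W).filter (fun g => F.contains g)).contains f := by
  rw [PySem.Dict.contains_eq_decide_mem_keys, PySem.Dict.keys_mk]
  have := tf_target_keys F W
  simp only [show (fun (x : String × String) => x.1) = Prod.fst from rfl]
  rw [this]
  simp

theorem tf_loopA_eq (F : PySem.Dict String String) (W : List String) :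
    W.foldl (tfStep F) PySem.Dict.empty = PySem.Dict.mk (tfTarget F W) := by
  induction W using List.reverseRecOn with
  | nil => rfl
  | append_singleton W f ih =>
    rw [List.foldl_append, List.foldl_cons, List.foldl_nil, ih]
    unfold tfStep
    by_cases hF : F.contains f
    · simp only [hF, if_true]
      by_cases hW : f ∈ W
      · -- insert of existing key with same value: dict unchanged; target unchanged
        have htgt : tfTarget F (W ++ [f]) = tfTarget F W := by
          unfold tfTarget; rw [tf_dedup_append_singleton, if_pos hW]
        rw [htgt]
        apply PySem.Dict.ext
        have hc : (PySem.Dict.mk (tfTarget F W)).contains f = true := by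
          rw [tf_target_contains]
          simp [List.mem_filter, hW, hF]
        rw [PySem.Dict.items_insert_of_contains _ _ hc]
        show List.map _ (tfTarget F W) = tfTarget F W
        have : List.map (fun p : String × String => if (p.1 == f) = true then (f, F.getD f "") else p) (tfTarget F W) = List.map id (tfTarget F W) := by
          apply List.map_congr_left
          intro p hp
          unfold tfTarget at hp
          rcases List.mem_map.mp hp with ⟨g, hg, rfl⟩
          by_cases hgf : g = f
          · subst hgf; simp
          · simp [hgf]
        rw [this, List.map_id]
      · have hc : (PySem.Dict.mk (tfTarget F W)).contains f = false := by
          rw [tf_target_contains]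
          simp [List.mem_filter, hW]
        apply PySem.Dict.ext
        rw [PySem.Dict.items_insert_of_not_contains _ _ hc]
        show tfTarget F W ++ [(f, F.getD f "")] = tfTarget F (W ++ [f])
        unfold tfTarget
        rw [tf_dedup_append_singleton, if_neg hW, List.filter_append, List.map_append]
        simp [hF]
    · simp only [hF]
      have htgt : tfTarget F (W ++ [f]) = tfTarget F W := by
        unfold tfTarget; rw [tf_dedup_append_singleton]
        by_cases hW : f ∈ W
        · rw [if_pos hW]
        · rw [if_neg hW, List.filter_append]; simp [hF]
      rw [htgt]
      simp

theorem tf_rank_get? (W : List String) (s : Int) (d : PySem.Dict String Int) (f : String) :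
    ((PySem.List.enumerate W s).foldl
        (fun r p => if r.contains p.2 then r else r.insert p.2 p.1) d).get? f =
      if d.contains f then d.get? f
      else if f ∈ W then some (s + (W.idxOf f : Int)) else none := by
  induction W generalizing s d with
  | nil =>
    simp only [PySem.List.enumerate_nil, List.foldl_nil, List.not_mem_nil, if_false]
    by_cases hc : d.contains f
    · simp [hc]
    · rw [if_neg hc]
      rw [PySem.Dict.get?_eq_none_iff_contains]
      simpa using hc
  | cons x xs ih =>
    rw [PySem.List.enumerate_cons, List.foldl_cons]
    by_cases hxf : x = f
    · subst hxf
      by_cases hc : d.contains x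
      · rw [if_pos hc, ih]
        simp [hc]
      · rw [if_neg hc, ih]
        have : (d.insert x s).contains x = true := PySem.Dict.contains_insert_self d x s
        simp [this, PySem.Dict.get?_insert_self, List.idxOf_cons_self, hc]
    · have hbx : (x == f) = false := by simpa using hxf
      by_cases hc : d.contains x
      · rw [if_pos hc, ih]
        have hidx : (x :: xs).idxOf f = xs.idxOf f + 1 := by
          simp [List.idxOf_cons, hbx]
        by_cases hcf : d.contains f
        · simp [hcf]
        · simp only [hcf]
          by_cases hm : f ∈ xs
          · simp [hm, hidx, List.mem_cons]
            ring
          · simp [hm, Ne.symm hxf]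
      · rw [if_neg hc, ih]
        have hcf' : (d.insert x s).contains f = d.contains f := by
          rw [PySem.Dict.contains_insert]
          simp [show (f == x) = false by simpa using (Ne.symm hxf)]
        rw [hcf']
        by_cases hcf : d.contains f
        · simp only [hcf, if_true]
          exact PySem.Dict.get?_insert_of_ne d s (Ne.symm hxf)
        · simp only [hcf]
          have hidx : (x :: xs).idxOf f = xs.idxOf f + 1 := by
            simp [List.idxOf_cons, hbx]
          by_cases hm : f ∈ xs
          · simp [hm, hidx, List.mem_cons]
            ring
          · simp [hm, Ne.symm hxf]

theorem tf_rank_get?_zero (W : List String) (f : String) :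
    ((PySem.List.enumerate W 0).foldl
        (fun r p => if r.contains p.2 then r else r.insert p.2 p.1)
        (PySem.Dict.empty : PySem.Dict String Int)).get? f =
      if f ∈ W then some ((W.idxOf f : Int)) else none := by
  rw [tf_rank_get?]
  simp [PySem.Dict.contains_empty]

theorem tf_rank_contains (W : List String) (f : String) :
    ((PySem.List.enumerate W 0).foldl
        (fun r p => if r.contains p.2 then r else r.insert p.2 p.1)
        (PySem.Dict.empty : PySem.Dict String Int)).contains f = decide (f ∈ W) := by
  rw [PySem.Dict.contains_eq_isSome_get?, tf_rank_get?_zero]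
  by_cases h : f ∈ W <;> simp [h]

theorem tf_dedup_pairwise_idxOf (W : List String) :
    (PySem.List.dedup W).Pairwise (fun a b => W.idxOf a < W.idxOf b) := by
  induction W using List.reverseRecOn with
  | nil => simp
  | append_singleton W f ih =>
    rw [tf_dedup_append_singleton]
    have hmem : ∀ a, a ∈ PySem.List.dedup W → a ∈ W := by
      intro a ha; exact (PySem.List.mem_dedup _ _).mp ha
    have hsame : ∀ a ∈ PySem.List.dedup W, ∀ b ∈ PySem.List.dedup W,
        W.idxOf a < W.idxOf b → (W ++ [f]).idxOf a < (W ++ [f]).idxOf b := by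
      intro a ha b hb h
      rw [List.idxOf_append, if_pos (hmem a ha), List.idxOf_append, if_pos (hmem b hb)]
      exact h
    by_cases h : f ∈ W
    · rw [if_pos h]
      exact List.Pairwise.imp_of_mem (fun ha hb => hsame _ ha _ hb) ih
    · rw [if_neg h]
      rw [List.pairwise_append]
      refine ⟨List.Pairwise.imp_of_mem (fun ha hb => hsame _ ha _ hb) ih, by simp, ?_⟩
      intro a ha b hb
      have hb' : b = f := by simpa using hb
      subst hb'
      rw [List.idxOf_append, if_pos (hmem a ha), List.idxOf_append, if_neg h]
      have : W.idxOf a < W.length := List.idxOf_lt_length_of_mem (hmem a ha)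
      omega

theorem tf_mem_target (Fields : List (String × String)) (hnd : (Fields.map Prod.fst).Nodup)
    (W : List String) (p : String × String) :
    p ∈ tfTarget (PySem.Dict.mk Fields) W ↔ p ∈ Fields ∧ p.1 ∈ W := by
  have hkeys : (PySem.Dict.mk Fields).keys.Nodup := by
    rw [PySem.Dict.keys_mk]; exact hnd
  constructor
  · intro hp
    rcases List.mem_map.mp hp with ⟨g, hg, rfl⟩
    rcases List.mem_filter.mp hg with ⟨hgd, hgc⟩
    have hgW : g ∈ W := (PySem.List.mem_dedup _ _).mp hgd
    have : ∃ v, (PySem.Dict.mk Fields).get? g = some v := by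
      have := hgc
      rw [PySem.Dict.contains_eq_isSome_get?] at this
      exact Option.isSome_iff_exists.mp this
    rcases this with ⟨v, hv⟩
    have hmem : (g, v) ∈ Fields :=
      (PySem.Dict.get?_eq_some_iff_mem_items _ _ _ hkeys).mp hv
    have hgd' : (PySem.Dict.mk Fields).getD g "" = v :=
      PySem.Dict.getD_of_get?_eq_some _ "" hv
    exact ⟨by rw [hgd']; exact hmem, hgW⟩
  · rintro ⟨hpF, hpW⟩
    have hv : (PySem.Dict.mk Fields).get? p.1 = some p.2 :=
      (PySem.Dict.get?_eq_some_iff_mem_items _ _ _ hkeys).mpr (by simpa using hpF)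
    have hc : (PySem.Dict.mk Fields).contains p.1 = true := by
      rw [PySem.Dict.contains_eq_isSome_get?, hv]; rfl
    refine List.mem_map.mpr ⟨p.1, List.mem_filter.mpr ⟨(PySem.List.mem_dedup _ _).mpr hpW, hc⟩, ?_⟩
    simp [PySem.Dict.getD_of_get?_eq_some _ "" hv]

theorem tf_loopB_eq (Fields : List (String × String)) (hnd : (Fields.map Prod.fst).Nodup)
    (W : List String) :
    (let rank : PySem.Dict String Int :=
      (PySem.List.enumerate W 0).foldl
        (fun r p => if r.contains p.2 then r else r.insert p.2 p.1) PySem.Dict.empty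
    let kept := Fields.filter (fun kv => rank.contains kv.1)
    let srt := PySem.List.sorted kept (fun kv => rank.getD kv.1 0)
    (srt.foldl (fun d kv => d.insert kv.1 kv.2) PySem.Dict.empty).items) =
      tfTarget (PySem.Dict.mk Fields) W := by
  simp only []
  set rank : PySem.Dict String Int := (PySem.List.enumerate W 0).foldl
        (fun r p => if r.contains p.2 then r else r.insert p.2 p.1) PySem.Dict.empty with hrank
  set kept := Fields.filter (fun kv => rank.contains kv.1) with hkeptdef
  set srt := PySem.List.sorted kept (fun kv => rank.getD kv.1 0) with hsrtdef
  set T := tfTarget (PySem.Dict.mk Fields) W with hT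
  -- membership in T in terms of Fields and W
  have hmemT : ∀ p : String × String, p ∈ T ↔ p ∈ Fields ∧ p.1 ∈ W :=
    tf_mem_target Fields hnd W
  -- first coordinate of a T element lies in W
  have hfstW : ∀ p ∈ T, p.1 ∈ W := fun p hp => ((hmemT p).mp hp).2
  -- keys of T are the (nodup) filtered dedup list
  have hTmapfst : T.map Prod.fst = (PySem.List.dedup W).filter (fun f => (PySem.Dict.mk Fields).contains f) := by
    simp [hT, tfTarget, Function.comp_def]
  have hTkeysNodup : (T.map Prod.fst).Nodup := by
    rw [hTmapfst]
    exact (PySem.List.nodup_dedup W).filter _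
  have hTnodup : T.Nodup := hTkeysNodup.of_map
  -- kept is the ∈-W filter of Fields
  have hkept : kept = Fields.filter (fun kv => decide (kv.1 ∈ W)) := by
    apply List.filter_congr
    intro kv _
    exact tf_rank_contains W kv.1
  have hkeptNodup : kept.Nodup := (hnd.of_map).filter _
  -- T is a permutation of kept
  have hperm : T.Perm kept := by
    rw [List.perm_ext_iff_of_nodup hTnodup hkeptNodup]
    intro p
    rw [hmemT p, hkept]
    simp [List.mem_filter, and_comm]
  -- the sort key agrees with idxOf on T
  have hkey : ∀ p ∈ T, rank.getD p.1 0 = (W.idxOf p.1 : Int) := by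
    intro p hp
    rw [PySem.Dict.getD_eq_get?_getD, tf_rank_get?_zero, if_pos (hfstW p hp)]
    rfl
  -- T is strictly increasing under the sort key
  have hpw : T.Pairwise (fun a b => rank.getD a.1 0 < rank.getD b.1 0) := by
    have h1 : T.Pairwise (fun a b => W.idxOf a.1 < W.idxOf b.1) := by
      rw [hT]
      unfold tfTarget
      rw [List.pairwise_map]
      exact (tf_dedup_pairwise_idxOf W).sublist List.filter_sublist
    refine List.Pairwise.imp_of_mem ?_ h1
    intro a b ha hb hlt
    rw [hkey a ha, hkey b hb]
    exact_mod_cast hlt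
  have hsrt : srt = T := PySem.List.sorted_eq_of_perm_of_pairwise_lt _ _ _ hperm hpw
  rw [hsrt]
  rw [PySem.Dict.items_foldl_insert_fresh T Prod.fst Prod.snd PySem.Dict.empty
      (fun a _ => PySem.Dict.contains_empty a.1) hTkeysNodup]
  simp [PySem.Dict.empty]

-- ===== VERDICT (by name: the statement is the Claim_ definition above) =====
theorem table_fields_spec : Claim_equal_table_fields := by
  unfold Claim_equal_table_fields
  intro Fields Table Columns selection _ hpre
  obtain ⟨hnd, -⟩ := hpre
  unfold Spec_table_fields table_fields table_fields_alt
  simp only []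
  have hB := tf_loopB_eq Fields hnd
  have hstep : (fun (d : PySem.Dict String String) f =>
        if (PySem.Dict.mk Fields).contains f then d.insert f ((PySem.Dict.mk Fields).getD f "") else d)
      = tfStep (PySem.Dict.mk Fields) := rfl
  by_cases h1 : selection = "insert"
  · subst h1
    rw [if_pos (by decide : (("insert" == "insert") : Bool) = true),
        if_pos (by decide : ((("insert" == "insert") || ("insert" == "update")) : Bool) = true),
        if_pos (by decide : (("insert" == "insert") : Bool) = true)]
    rw [← List.foldl_append, hstep, tf_loopA_eq, hB]
  · by_cases h2 : selection = "update"
    · subst h2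
      rw [if_neg (by decide : ¬((("update" == "insert") : Bool) = true)),
          if_pos (by decide : ((("update" == "insert") || ("update" == "update")) : Bool) = true),
          if_neg (by decide : ¬((("update" == "insert") : Bool) = true)),
          if_pos (by decide : (("update" == "update") : Bool) = true)]
      rw [hstep, tf_loopA_eq, hB]
    · have hb1 : ¬((selection == "insert") = true) := by simpa using h1
      have hb2 : ¬((selection == "update") = true) := by simpa using h2
      have hor : ¬(((selection == "insert") || (selection == "update")) = true) := by
        simpa using ⟨h1, h2⟩
      rw [if_neg hb1, if_neg hor, if_neg hb1, if_neg hb2, hB []]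
      rfl
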